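-- pv_equiv track=rewrite | github.com/imn00133/algorithm | KakaoMockExam/Kakao2019Winter/problem3.py | combination_count
-- ===== SOURCE A (Python) =====
-- def combination_count(block_id, selected_id_list):
--     ret = 0
--     if not block_id:
--         return 1
--     for selected_id in block_id[0]:
--         if selected_id in selected_id_list:
--             continue
--         selected_id_list.append(selected_id)
--         ret += combination_count(block_id[1:], selected_id_list)
--         selected_id_list.pop()
--     return ret
-- ===== SOURCE B (Python) =====
-- def _product(blocks):
--     if not blocks:
--         return [()]
--     rest = _product(blocks[1:])
--     return [(x,) + t for x in blocks[0] for t in rest]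
--
--
-- def combination_count(block_id, selected_id_list):
--     count = 0
--     for t in _product(block_id):
--         seen = list(selected_id_list)
--         ok = True
--         for x in t:
--             if x in seen:
--                 ok = False
--                 break
--             seen.append(x)
--         count += ok
--     return count
-- ===== Notes on version B (the rewrite author's own statement) =====
-- stated objective: alternative
-- what changed: Replaces A's mutating backtracking recursion with explicit enumeration: build the full cartesian product of the blocks once, then count the tuples whose elements are pairwise distinct and avoid selected_id_list; B never mutates its arguments (A mutates selected_id_list in place but restores it before returning).
import Mathlib
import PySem

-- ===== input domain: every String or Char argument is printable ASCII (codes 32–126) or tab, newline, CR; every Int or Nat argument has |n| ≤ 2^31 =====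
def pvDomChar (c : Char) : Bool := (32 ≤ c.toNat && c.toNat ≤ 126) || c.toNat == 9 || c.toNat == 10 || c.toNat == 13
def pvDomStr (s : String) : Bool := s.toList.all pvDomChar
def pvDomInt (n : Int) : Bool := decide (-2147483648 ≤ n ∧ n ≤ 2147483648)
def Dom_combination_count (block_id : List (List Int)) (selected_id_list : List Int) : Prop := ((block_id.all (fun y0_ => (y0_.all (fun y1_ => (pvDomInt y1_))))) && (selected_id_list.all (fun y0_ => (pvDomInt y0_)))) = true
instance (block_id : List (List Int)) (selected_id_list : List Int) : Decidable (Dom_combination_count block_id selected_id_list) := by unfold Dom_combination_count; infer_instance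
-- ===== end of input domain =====

-- B counts valid selections by enumerating the cartesian product of the blocks and filtering,
-- instead of A's backtracking recursion (alternative decomposition, same cost).
-- A mutates selected_id_list in place but restores it; the equivalence proved is about the return value (B does not mutate).
-- ===== PORT A =====
-- A: recursive backtracking; appending then popping selected_id is ported as recursing on selected_id_list ++ [x].
def combination_count (block_id : List (List Int)) (selected_id_list : List Int) : Int :=
  match block_id with
  | [] => 1
  | b :: rest =>
    b.foldl (fun ret x =>
      if x ∈ selected_id_list then ret
      else ret + combination_count rest (selected_id_list ++ [x])) 0

-- ===== PORT B =====
-- cartesian product of the blocks, as in Source B's _product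
def pvProduct (blocks : List (List Int)) : List (List Int) :=
  match blocks with
  | [] => [[]]
  | b :: rest => b.flatMap (fun x => (pvProduct rest).map (fun t => x :: t))

-- the inner scan of Source B: seen starts as selected_id_list and grows along the tuple
def pvValid (seen : List Int) (t : List Int) : Bool :=
  match t with
  | [] => true
  | x :: xs => if seen.contains x then false else pvValid (seen ++ [x]) xs

def combination_count_alt (block_id : List (List Int)) (selected_id_list : List Int) : Int :=
  ((pvProduct block_id).filter (pvValid selected_id_list)).length

-- ===== PRECONDITION & SPEC =====
def Spec_combination_count (block_id : List (List Int)) (selected_id_list : List Int) (out : Int) : Prop := out = combination_count_alt block_id selected_id_list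
instance (block_id : List (List Int)) (selected_id_list : List Int) (out : Int) : Decidable (Spec_combination_count block_id selected_id_list out) := by unfold Spec_combination_count; infer_instance

-- ===== CLAIM (what is proved, stated in full; the proofs are below) =====
def Claim_equal_combination_count : Prop := ∀ (block_id : List (List Int)) (selected_id_list : List Int), Dom_combination_count block_id selected_id_list → Spec_combination_count block_id selected_id_list (combination_count block_id selected_id_list)

-- ===== LEMMAS AND PROOFS =====

-- ===== VERDICT (by name: the statement is the Claim_ definition above) =====
lemma cc_eq_count : ∀ (bs : List (List Int)) (sel : List Int),
    combination_count bs sel = (((pvProduct bs).filter (pvValid sel)).length : Int) := by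
  intro bs
  induction bs with
  | nil => intro sel; simp [combination_count, pvProduct, pvValid]
  | cons b rest ih =>
    intro sel
    have inner : ∀ (b' : List Int) (a : Int),
        b'.foldl (fun ret x =>
          if x ∈ sel then ret
          else ret + combination_count rest (sel ++ [x])) a
        = a + (((b'.flatMap fun x => (pvProduct rest).map (fun t => x :: t)).filter
            (pvValid sel)).length : Int) := by
      intro b'
      induction b' with
      | nil => intro a; simp
      | cons x b'' ihb =>
        intro a
        by_cases hx : x ∈ sel
        · simp only [List.foldl_cons, if_pos hx, ihb, List.flatMap_cons,
            List.filter_append, List.length_append]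
          have hfilter : ((pvProduct rest).map (fun t => x :: t)).filter (pvValid sel) = [] := by
            rw [List.filter_map]
            have : ((pvProduct rest).filter (pvValid sel ∘ fun t => x :: t)) = [] := by
              apply List.filter_eq_nil_iff.mpr
              intro t _
              simp [pvValid, hx]
            rw [this]; rfl
          rw [hfilter]
          simp
        · simp only [List.foldl_cons, if_neg hx, ihb, List.flatMap_cons,
            List.filter_append, List.length_append]
          have hfilter : ((pvProduct rest).map (fun t => x :: t)).filter (pvValid sel)
              = ((pvProduct rest).filter (pvValid (sel ++ [x]))).map (fun t => x :: t) := by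
            rw [List.filter_map]
            congr 1
            apply List.filter_congr
            intro t _
            simp [pvValid, Function.comp, hx]
          rw [hfilter, List.length_map, ih (sel ++ [x])]
          push_cast
          ring
    show (b.foldl _ 0 : Int) = _
    rw [inner b 0]
    simp [pvProduct]

theorem combination_count_spec : Claim_equal_combination_count := by
  intro bs sel _
  unfold Spec_combination_count combination_count_alt
  exact cc_eq_count bs sel
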